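-- pv_equiv track=rewrite | github.com/agilestar8/coding-test- | 프로그래머스 lv3/숫자게임.py | solution
-- ===== SOURCE A (Python) =====
-- def solution(A, B):
--     answer = 0
--
--     n = len(A)
--     # n번의 대결 중 최대한 많이 이기기
--     # A - 1 3 5 7
--     # B - 2 2 6 8
--
--     # 투 포인터 알고리즘
--     A.sort()
--     B.sort()
--     j = 0
--
--     for i in range(n):  # B가 증가하면서
--         if A[j] < B[i]: # 조건에 맞으면, A,B 둘다 증가
--             answer += 1
--             j += 1 # A증가
--
--         # 안맞으면 다음 B 서치
--     return answer
-- ===== SOURCE B (Python) =====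
-- def solution(A, B):
--     # Rank-counting instead of pointer consumption: an opponent value v can beat
--     # exactly the A-members strictly below it; since the `wins` smallest members
--     # of A are already beaten, v scores a new win iff wins < rank(v), where
--     # rank(v) = number of A-elements strictly less than v (binary search).
--     # Sorts both arguments in place, like the original.
--     A.sort()
--     B.sort()
--     wins = 0
--     for v in B[:len(A)]:
--         lo, hi = 0, len(A)
--         while lo < hi:               # bisect-left rank of v in sorted A
--             mid = (lo + hi) // 2
--             if A[mid] < v:
--                 lo = mid + 1
--             else:
--                 hi = mid
--         if wins < lo:
--             wins += 1
--     return wins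
-- ===== Notes on version B (the rewrite author's own statement) =====
-- stated objective: alternative
-- what changed: A consumes sorted A with a pointer advanced while scanning sorted B; B never consumes A: for each of B's n smallest values it computes its rank in sorted A by hand-rolled binary search and counts a win iff the running win count is below that rank.
import Mathlib
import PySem

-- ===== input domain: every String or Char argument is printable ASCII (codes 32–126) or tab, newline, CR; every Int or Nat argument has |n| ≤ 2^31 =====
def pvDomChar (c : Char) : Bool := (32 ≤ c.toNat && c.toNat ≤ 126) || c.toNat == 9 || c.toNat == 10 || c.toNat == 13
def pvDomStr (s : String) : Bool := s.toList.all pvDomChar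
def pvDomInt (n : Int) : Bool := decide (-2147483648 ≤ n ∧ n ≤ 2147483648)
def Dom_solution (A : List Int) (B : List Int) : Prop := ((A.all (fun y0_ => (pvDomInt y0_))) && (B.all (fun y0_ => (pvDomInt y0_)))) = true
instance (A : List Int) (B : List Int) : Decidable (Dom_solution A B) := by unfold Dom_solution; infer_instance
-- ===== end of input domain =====

-- B replaces A's pointer-consuming greedy over sorted A by rank counting: for each
-- of B's n smallest values it binary-searches the value's rank in sorted A and wins
-- iff the running win count is below that rank (objective: alternative).
-- Both A and B sort their list arguments IN PLACE; the equivalence proved here is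
-- about the return value only (the mutation is identical anyway: both sort ascending).

-- ===== PORT A =====
-- A[j] is ported with pyGetD (default 0): under Pre_solution the index j is always
-- in range; the inputs where Python would raise IndexError are excluded by Pre_.
def solution (A : List Int) (B : List Int) : Int :=
  let a := PySem.List.sorted A (fun x => x) false
  let b := PySem.List.sorted B (fun x => x) false
  let n : Int := (A.length : Int)
  ((PySem.List.pyRange 0 n 1).foldl
    (fun (st : Int × Int) i =>
      if PySem.List.pyGetD a st.2 0 < PySem.List.pyGetD b i 0 then (st.1 + 1, st.2 + 1)
      else st)
    (0, 0)).1

-- ===== PORT B =====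
-- Source B's inner `while lo < hi` bisect loop, step for step; A[mid] is ported with
-- pyGetD (default 0): every reachable call has 0 ≤ lo ≤ mid < hi ≤ len(A).
def bsGo (a : List Int) (v : Int) : Nat → Int → Int → Int
  | 0, lo, _ => lo
  | n + 1, lo, hi =>
    if lo < hi then
      let mid := PySem.Int.floordiv (lo + hi) 2
      if PySem.List.pyGetD a mid 0 < v then bsGo a v n (mid + 1) hi
      else bsGo a v n lo mid
    else lo

-- the loop shrinks hi - lo by at least 1 per iteration, so (hi - lo).toNat fuel is exact
def bsLoop (a : List Int) (v : Int) (lo hi : Int) : Int :=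
  bsGo a v (hi - lo).toNat lo hi

-- the outer for-loop over B[:len(A)] (A is the in-place sorted list here)
def solution_alt (A : List Int) (B : List Int) : Int :=
  let a := PySem.List.sorted A (fun x => x) false
  let b := PySem.List.sorted B (fun x => x) false
  (PySem.List.slice b none (some (a.length : Int))).foldl
    (fun (wins : Int) v => if wins < bsLoop a v 0 (a.length : Int) then wins + 1 else wins)
    0

-- ===== PRECONDITION & SPEC =====
-- Exactly the inputs on which Python A returns: when len(B) < len(A), A raises
-- IndexError (B[i] past the end).
def Pre_solution (A : List Int) (B : List Int) : Prop := A.length ≤ B.length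
instance (A : List Int) (B : List Int) : Decidable (Pre_solution A B) := by
  unfold Pre_solution; infer_instance

def pvWitness_solution : List Int × List Int := ([1, 3, 5, 7], [2, 2, 6, 8])

def Spec_solution (A : List Int) (B : List Int) (out : Int) : Prop := out = solution_alt A B
instance (A : List Int) (B : List Int) (out : Int) : Decidable (Spec_solution A B out) := by
  unfold Spec_solution; infer_instance

-- ===== CLAIM (what is proved, stated in full; the proofs are below) =====
def Claim_equal_solution : Prop :=
  ∀ (A : List Int) (B : List Int), Dom_solution A B → Pre_solution A B →
    Spec_solution A B (solution A B)

-- ===== LEMMAS AND PROOFS =====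

-- A's forward greedy, as structural recursion: scan b (ascending), consume a
-- from the front on each win.
def Fgo : List Int → List Int → Int
  | _, [] => 0
  | [], _ :: _ => 0
  | ah :: at', bh :: bt => if ah < bh then 1 + Fgo at' bt else Fgo (ah :: at') bt
termination_by _a b => b.length

theorem Fgo_nil_left (b : List Int) : Fgo [] b = 0 := by
  cases b <;> simp [Fgo]

-- The foldl of A's loop, started at pointer value c, counts Fgo on a.drop c.
theorem bridge (bs : List Int) : ∀ (a : List Int) (c : ℕ) (x : Int),
    c + bs.length ≤ a.length →
    (bs.foldl
      (fun (st : Int × Int) bi =>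
        if PySem.List.pyGetD a st.2 0 < bi then (st.1 + 1, st.2 + 1) else st)
      (x, (c : Int))).1 = x + Fgo (a.drop c) bs := by
  induction bs with
  | nil => intro a c x _; simp [Fgo]
  | cons bh bt ih =>
      intro a c x hlen
      have hc : c < a.length := by simp at hlen; omega
      have hd : a.drop c = a[c] :: a.drop (c + 1) := List.drop_eq_getElem_cons hc
      have hget : PySem.List.pyGetD a ((c : ℕ) : Int) 0 = a[c] :=
        PySem.List.pyGetD_ofNat a c 0 hc
      simp only [List.foldl_cons, hget, hd, Fgo]
      split_ifs with h
      · have : ((c : Int) + 1) = (((c + 1 : ℕ)) : Int) := by push_cast; ring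
        rw [this, ih a (c + 1) (x + 1) (by simp at hlen ⊢; omega)]
        rw [← List.drop_drop]
        rw [hd]
        simp [List.drop]
        ring
      · rw [ih a c x (by simp at hlen ⊢; omega), hd]

-- In a sorted list, a[i] < v exactly when i is below v's rank (countP (· < v)).
theorem rank_iff (v : Int) : ∀ (a : List Int), a.Pairwise (· ≤ ·) →
    ∀ (i : ℕ) (h : i < a.length),
      (a[i] < v ↔ i < a.countP (fun x => decide (x < v))) := by
  intro a
  induction a with
  | nil => intro _ i h; simp at h
  | cons x xs ih =>
      intro hp i h
      have hx : ∀ y ∈ xs, x ≤ y := (List.pairwise_cons.1 hp).1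
      have hxs : xs.Pairwise (· ≤ ·) := (List.pairwise_cons.1 hp).2
      cases i with
      | zero =>
          by_cases hxv : x < v
          · simp [hxv]
          · have hz : xs.countP (fun x => decide (x < v)) = 0 :=
              List.countP_eq_zero.2 (fun y hy => by
                have := hx y hy; simp; omega)
            simp [hxv, hz]
      | succ i =>
          have hi : i < xs.length := by simpa using h
          by_cases hxv : x < v
          · have := ih hxs i hi
            simp [hxv]
            omega
          · have hz : xs.countP (fun x => decide (x < v)) = 0 :=
              List.countP_eq_zero.2 (fun y hy => by
                have := hx y hy; simp; omega)
            have hge : ¬ xs[i] < v := by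
              have h1 := hx xs[i] (List.getElem_mem hi)
              omega
            simp [hxv, hz, hge]

-- Source B's bisect loop computes the rank, given the loop invariant lo ≤ rank ≤ hi.
theorem bsGo_correct (a : List Int) (v : Int) (hp : a.Pairwise (· ≤ ·)) :
    ∀ (n : ℕ) (lo hi : Int), (hi - lo).toNat ≤ n → 0 ≤ lo → hi ≤ (a.length : Int) →
      lo ≤ (a.countP (fun x => decide (x < v)) : Int) →
      (a.countP (fun x => decide (x < v)) : Int) ≤ hi →
      bsGo a v n lo hi = (a.countP (fun x => decide (x < v)) : Int) := by
  intro n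
  induction n with
  | zero => intro lo hi hn _ _ hlo hhi; simp only [bsGo]; omega
  | succ n IH =>
      intro lo hi hn h0 hlen hlo hhi
      simp only [bsGo]
      by_cases h : lo < hi
      · rw [if_pos h]
        have hb := PySem.Int.floordiv_two_mid_bounds (le_of_lt h)
        have hltm : PySem.Int.floordiv (lo + hi) 2 < hi := by
          rw [PySem.Int.floordiv_lt_iff_lt_mul (by omega)]; omega
        set mid := PySem.Int.floordiv (lo + hi) 2 with hmid
        have hmr : mid.toNat < a.length := by omega
        have hget : PySem.List.pyGetD a mid 0 = a[mid.toNat] := by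
          have : PySem.List.pyGetD a ((mid.toNat : ℕ) : Int) 0 = a[mid.toNat] :=
            PySem.List.pyGetD_ofNat a mid.toNat 0 hmr
          rwa [Int.toNat_of_nonneg (by omega)] at this
        have hriff := rank_iff v a hp mid.toNat hmr
        simp only [hget]
        split_ifs with hc
        · exact IH (mid + 1) hi (by omega) (by omega) hlen
            (by have := hriff.1 hc; omega) hhi
        · exact IH lo mid (by omega) h0 (by omega) hlo
            (by by_contra hcon
                have : mid.toNat < a.countP (fun x => decide (x < v)) := by omega
                exact hc (hriff.2 this))
      · rw [if_neg h]; omega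

-- The win-counter rank rule equals A's consuming greedy on sorted a (any b order).
theorem fold_rank (a : List Int) (hp : a.Pairwise (· ≤ ·)) : ∀ (bs : List Int) (j : ℕ),
    bs.foldl
      (fun (w : Int) v =>
        if w < (a.countP (fun x => decide (x < v)) : Int) then w + 1 else w)
      (j : Int)
    = (j : Int) + Fgo (a.drop j) bs := by
  intro bs
  induction bs with
  | nil => intro j; simp [Fgo]
  | cons v bt ih =>
      intro j
      simp only [List.foldl_cons]
      by_cases hc : (j : Int) < (a.countP (fun x => decide (x < v)) : Int)
      · have hjr : j < a.countP (fun x => decide (x < v)) := by exact_mod_cast hc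
        have hjl : j < a.length := lt_of_lt_of_le hjr List.countP_le_length
        have hd : a.drop j = a[j] :: a.drop (j + 1) := List.drop_eq_getElem_cons hjl
        have hav : a[j] < v := (rank_iff v a hp j hjl).2 hjr
        rw [if_pos hc]
        have : ((j : Int) + 1) = (((j + 1 : ℕ)) : Int) := by push_cast; ring
        rw [this, ih (j + 1), hd]
        simp only [Fgo, if_pos hav]
        push_cast; ring
      · rw [if_neg hc]
        rw [ih j]
        by_cases hjl : j < a.length
        · have hd : a.drop j = a[j] :: a.drop (j + 1) := List.drop_eq_getElem_cons hjl
          have hav : ¬ a[j] < v := fun hlt => hc (by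
            exact_mod_cast (rank_iff v a hp j hjl).1 hlt)
          rw [hd]
          simp only [Fgo, if_neg hav]
        · have hd : a.drop j = [] := List.drop_eq_nil_of_le (by omega)
          rw [hd, Fgo_nil_left, Fgo_nil_left]

-- ===== VERDICT (by name: the statement is the Claim_ definition above) =====
theorem solution_spec : Claim_equal_solution := by
  intro A B _ hpre
  have hpre' : A.length ≤ B.length := hpre
  unfold Spec_solution solution solution_alt
  simp only []
  set a := PySem.List.sorted A (fun x => x) false with ha
  set b := PySem.List.sorted B (fun x => x) false with hbdef
  have hla : a.length = A.length := PySem.List.length_sorted A (fun x => x) false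
  have hlb : b.length = B.length := PySem.List.length_sorted B (fun x => x) false
  set k := A.length with hk
  have hkb : k ≤ b.length := by omega
  -- A's loop only reads b[0], …, b[k-1]: replace b by b.take k
  have hcongr : ∀ (st : Int × Int) (i : Int), i ∈ PySem.List.pyRange 0 (k : Int) 1 →
      (if PySem.List.pyGetD a st.2 0 < PySem.List.pyGetD b i 0 then
        (st.1 + 1, st.2 + 1) else st)
      = (if PySem.List.pyGetD a st.2 0 < PySem.List.pyGetD (b.take k) i 0 then
        (st.1 + 1, st.2 + 1) else st) := by
    intro st i hi
    rcases (PySem.List.mem_pyRange_one).1 hi with ⟨h0, h1⟩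
    have hik : i.toNat < k := by omega
    rw [PySem.List.pyGetD_eq_getElem b 0 h0 (by omega),
        PySem.List.pyGetD_eq_getElem (b.take k) 0 h0
          (by rw [List.length_take]; push_cast; omega)]
    rw [List.getElem_take]
  rw [PySem.List.foldl_congr_mem _ _ _ _ hcongr]
  have hlt : ((b.take k).length : Int) = (k : Int) := by
    rw [List.length_take]; omega
  rw [show ((k : Int) = ((b.take k).length : Int)) from hlt.symm]
  rw [PySem.List.foldl_pyRange_zero_pyGetD' (b.take k) 0
        (fun (st : Int × Int) bi =>
          if PySem.List.pyGetD a st.2 0 < bi then (st.1 + 1, st.2 + 1) else st)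
        ((0 : Int), (0 : Int))]
  have h0 : ((0 : ℕ) : Int) = (0 : Int) := rfl
  have hbr := bridge (b.take k) a 0 0 (by rw [List.length_take]; omega)
  rw [h0] at hbr
  rw [hbr, List.drop_zero]
  have pa : a.Pairwise (· ≤ ·) := by
    simpa using PySem.List.sorted_pairwise A (fun x => x)
  -- B's side: the slice is b.take k, the bisect loop is the rank
  rw [PySem.List.slice_to_natCast, hla]
  have hbs : ∀ (w : Int) (v : Int), v ∈ b.take k →
      (if w < bsLoop a v 0 ((k : ℕ) : Int) then w + 1 else w)
      = (if w < (a.countP (fun x => decide (x < v)) : Int) then w + 1 else w) := by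
    intro w v _
    have hcle : a.countP (fun x => decide (x < v)) ≤ a.length := List.countP_le_length
    rw [bsLoop, bsGo_correct a v pa (((k : ℕ) : Int) - 0).toNat 0 ((k : ℕ) : Int) le_rfl
          (by omega) (by omega) (by positivity) (by omega)]
  rw [PySem.List.foldl_congr_mem _ _ _ _ hbs]
  have := fold_rank a pa (b.take k) 0
  rw [h0] at this
  rw [this, List.drop_zero]
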